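-- pv_equiv track=rewrite | github.com/EZotoff/ez-game-of-life | src/petri_dish/tools/overseer_scout.py | _is_blocked_hostname
-- ===== SOURCE A (Python) =====
-- def _is_blocked_hostname(hostname: str, blocked_domains: list[str]) -> bool:
--     host = hostname.lower().strip().rstrip(".")
--     if host == "localhost" or host.endswith(".local"):
--         return True
--
--     normalized = [x.lower().strip().lstrip("*.") for x in blocked_domains if x.strip()]
--     for blocked in normalized:
--         if not blocked:
--             continue
--         if host == blocked or host.endswith(f".{blocked}"):
--             return True
--     return False
-- ===== SOURCE B (Python) =====
-- def _is_blocked_hostname(hostname: str, blocked_domains: list[str]) -> bool: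
--     host = hostname.lower().strip().rstrip(".")
--     if host == "localhost" or host.endswith(".local"):
--         return True
--     blocked = set()
--     for x in blocked_domains:
--         if x.strip():
--             d = x.lower().strip().lstrip("*.")
--             if d:
--                 blocked.add(d)
--     candidates = {host}
--     for i, ch in enumerate(host):
--         if ch == ".":
--             candidates.add(host[i + 1:])
--     return not blocked.isdisjoint(candidates)
-- ===== Notes on version B (the rewrite author's own statement) =====
-- stated objective: alternative
-- what changed: Replaces A's per-blocked-domain equality/endswith loop by building a set of normalized blocked domains and the set of the host's dot-suffix candidates, then testing the two sets for intersection.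
import Mathlib
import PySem

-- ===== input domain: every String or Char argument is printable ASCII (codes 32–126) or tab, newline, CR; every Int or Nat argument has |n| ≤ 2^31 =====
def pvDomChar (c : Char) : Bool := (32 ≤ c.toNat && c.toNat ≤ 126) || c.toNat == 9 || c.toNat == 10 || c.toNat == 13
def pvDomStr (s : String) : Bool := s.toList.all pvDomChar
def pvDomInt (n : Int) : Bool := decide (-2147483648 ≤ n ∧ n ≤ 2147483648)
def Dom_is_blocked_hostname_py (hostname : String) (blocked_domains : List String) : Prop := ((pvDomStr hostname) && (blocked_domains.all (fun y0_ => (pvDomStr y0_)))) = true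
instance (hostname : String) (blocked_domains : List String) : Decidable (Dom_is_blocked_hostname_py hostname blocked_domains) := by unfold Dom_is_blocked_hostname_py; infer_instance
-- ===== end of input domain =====

-- B replaces A's per-blocked-domain suffix loop by one set of normalized blocked domains plus the
-- bounded set of the host's dot-suffix candidates, and tests the two sets for intersection (alternative).

-- shared helpers: the exact normalization both Pythons perform
-- rstrip(".") : drop all trailing '.' characters (exact: single strip-char)
def pyRstripDot (s : List Char) : List Char := (s.reverse.dropWhile (· == '.')).reverse
-- lstrip("*.") : drop all leading characters that are '*' or '.' (exact: char-set lstrip)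
def pyLstripStarDot (s : List Char) : List Char := s.dropWhile (fun c => c == '*' || c == '.')
def normHost (hostname : String) : List Char :=
  pyRstripDot (PySem.Chars.strip (PySem.Chars.lower hostname.toList))
def normDomain (x : String) : List Char :=
  pyLstripStarDot (PySem.Chars.strip (PySem.Chars.lower x.toList))

-- ===== PORT A =====
def aLoop (host : List Char) : List (List Char) → Bool
  | [] => false
  | b :: rest =>
    if b == [] then aLoop host rest
    else if host == b || PySem.Chars.endswith host ('.' :: b) then true
    else aLoop host rest

def is_blocked_hostname_py (hostname : String) (blocked_domains : List String) : Bool :=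
  let host := normHost hostname
  if host == "localhost".toList || PySem.Chars.endswith host ".local".toList then true
  else
    let normalized := (blocked_domains.filter (fun x => !(PySem.Chars.strip x.toList == []))).map normDomain
    aLoop host normalized

-- ===== PORT B =====
def bBlocked (blocked_domains : List String) : PySem.Set (List Char) :=
  blocked_domains.foldl (fun acc x =>
    if !(PySem.Chars.strip x.toList == []) then
      let d := normDomain x
      if !(d == []) then PySem.Set.add acc d else acc
    else acc) PySem.Set.empty

def bCandidates (host : List Char) : PySem.Set (List Char) :=
  (PySem.List.enumerate host 0).foldl
    (fun acc p => if p.2 == '.' then PySem.Set.add acc (PySem.Chars.slice host (some (p.1 + 1)) none) else acc)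
    (PySem.Set.ofList [host])

def is_blocked_hostname_py_alt (hostname : String) (blocked_domains : List String) : Bool :=
  let host := normHost hostname
  if host == "localhost".toList || PySem.Chars.endswith host ".local".toList then true
  else (bBlocked blocked_domains).any (fun d => PySem.Set.contains (bCandidates host) d)

-- ===== PRECONDITION & SPEC =====
def Spec_is_blocked_hostname_py (hostname : String) (blocked_domains : List String) (out : Bool) : Prop := out = is_blocked_hostname_py_alt hostname blocked_domains
instance (hostname : String) (blocked_domains : List String) (out : Bool) : Decidable (Spec_is_blocked_hostname_py hostname blocked_domains out) := by unfold Spec_is_blocked_hostname_py; infer_instance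

-- ===== CLAIM (what is proved, stated in full; the proofs are below) =====
def Claim_equal_is_blocked_hostname_py : Prop := ∀ (hostname : String) (blocked_domains : List String), Dom_is_blocked_hostname_py hostname blocked_domains → Spec_is_blocked_hostname_py hostname blocked_domains (is_blocked_hostname_py hostname blocked_domains)

-- ===== LEMMAS AND PROOFS =====

lemma aLoop_eq_any (host : List Char) (l : List (List Char)) :
    aLoop host l = l.any (fun b => !(b == []) && (host == b || PySem.Chars.endswith host ('.' :: b))) := by
  induction l with
  | nil => rfl
  | cons b rest ih =>
    simp only [aLoop, List.any_cons]
    split_ifs with h1 h2 <;> simp_all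

lemma mem_bBlocked (blocked_domains : List String) (d : List Char) :
    d ∈ bBlocked blocked_domains ↔
      ∃ x ∈ blocked_domains, PySem.Chars.strip x.toList ≠ [] ∧ normDomain x ≠ [] ∧ d = normDomain x := by
  have aux : ∀ (bd : List String) (acc : PySem.Set (List Char)),
      d ∈ bd.foldl (fun acc x =>
        if !(PySem.Chars.strip x.toList == []) then
          let dd := normDomain x
          if !(dd == []) then PySem.Set.add acc dd else acc
        else acc) acc ↔
      d ∈ acc ∨ ∃ x ∈ bd, PySem.Chars.strip x.toList ≠ [] ∧ normDomain x ≠ [] ∧ d = normDomain x := by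
    intro bd
    induction bd with
    | nil => simp
    | cons y ys ih =>
      intro acc
      simp only [List.foldl_cons, ih]
      split_ifs with h1 h2
      all_goals simp_all [PySem.Set.mem_add]
      all_goals tauto
  simpa [bBlocked, PySem.Set.empty] using aux blocked_domains PySem.Set.empty

lemma mem_bCandidates (host d : List Char) :
    d ∈ bCandidates host ↔ d = host ∨ ('.' :: d) <:+ host := by
  have aux : ∀ (l : List (Int × Char)) (acc : PySem.Set (List Char)),
      d ∈ l.foldl (fun acc p => if p.2 == '.' then PySem.Set.add acc (PySem.Chars.slice host (some (p.1 + 1)) none) else acc) acc ↔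
      d ∈ acc ∨ ∃ p ∈ l, p.2 = '.' ∧ d = PySem.Chars.slice host (some (p.1 + 1)) none := by
    intro l
    induction l with
    | nil => simp
    | cons q qs ih =>
      intro acc
      simp only [List.foldl_cons, ih]
      split_ifs with h1
      all_goals simp_all [PySem.Set.mem_add]
      all_goals tauto
  have hsuffix : ('.' :: d) <:+ host ↔
      ∃ k : Nat, ∃ h : k < host.length, host[k] = '.' ∧ d = host.drop (k + 1) := by
    constructor
    · rintro ⟨pre, hpre⟩
      have hlen : pre.length < host.length := by
        rw [← hpre]; simp
      have hdrop : host.drop pre.length = '.' :: d := by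
        rw [← hpre]; simp
      rw [List.drop_eq_getElem_cons hlen] at hdrop
      injection hdrop with h1 h2
      exact ⟨pre.length, hlen, h1, h2.symm⟩
    · rintro ⟨k, hk, hc, hd⟩
      have hdrop : host.drop k = '.' :: d := by
        rw [List.drop_eq_getElem_cons hk, hc, ← hd]
      rw [← hdrop]
      exact List.drop_suffix k host
  rw [bCandidates, aux, hsuffix]
  constructor
  · rintro (h | ⟨p, hp, hc, hd⟩)
    · left
      simpa [PySem.Set.mem_ofList] using h
    · right
      rw [PySem.List.mem_enumerate_iff] at hp
      obtain ⟨k, hk, rfl⟩ := hp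
      refine ⟨k, hk, by simpa using hc, ?_⟩
      have hcast : ((0 : Int) + k + 1) = ((k + 1 : Nat) : Int) := by push_cast; ring
      rw [hd]
      simp only [hcast, PySem.Chars.slice_eq_listSlice, PySem.List.slice_from_natCast]
  · rintro (h | ⟨k, hk, hc, hd⟩)
    · left; simp [PySem.Set.mem_ofList, h]
    · right
      refine ⟨((0 : Int) + k, host[k]), ?_, by simpa using hc, ?_⟩
      · rw [PySem.List.mem_enumerate_iff]; exact ⟨k, hk, rfl⟩
      · have hcast : ((0 : Int) + k + 1) = ((k + 1 : Nat) : Int) := by push_cast; ring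
        simp only [hcast, PySem.Chars.slice_eq_listSlice, PySem.List.slice_from_natCast]
        exact hd

lemma body_eq (host : List Char) (bd : List String) :
    aLoop host ((bd.filter (fun x => !(PySem.Chars.strip x.toList == []))).map normDomain)
      = (bBlocked bd).any (fun d => PySem.Set.contains (bCandidates host) d) := by
  rw [aLoop_eq_any, Bool.eq_iff_iff]
  simp only [List.any_eq_true, List.mem_map, List.mem_filter, Bool.and_eq_true,
    Bool.not_eq_true', Bool.or_eq_true, beq_iff_eq, beq_eq_false_iff_ne, ne_eq,
    PySem.Set.contains_iff, mem_bBlocked, mem_bCandidates]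
  constructor
  · rintro ⟨b, ⟨x, ⟨hx, hstrip⟩, rfl⟩, hne, hmatch⟩
    refine ⟨normDomain x, ⟨x, hx, hstrip, hne, rfl⟩, ?_⟩
    rcases hmatch with h | h
    · exact Or.inl h.symm
    · exact Or.inr ((PySem.Chars.endswith_iff _ _).mp h)
  · rintro ⟨dd, ⟨x, hx, hstrip, hne, rfl⟩, hcont⟩
    refine ⟨normDomain x, ⟨x, ⟨hx, hstrip⟩, rfl⟩, hne, ?_⟩
    rcases hcont with h | h
    · exact Or.inl h.symm
    · exact Or.inr ((PySem.Chars.endswith_iff _ _).mpr h)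

-- ===== VERDICT (by name: the statement is the Claim_ definition above) =====
theorem is_blocked_hostname_py_spec : Claim_equal_is_blocked_hostname_py := by
  intro hostname blocked_domains _
  unfold Spec_is_blocked_hostname_py
  show is_blocked_hostname_py hostname blocked_domains = is_blocked_hostname_py_alt hostname blocked_domains
  unfold is_blocked_hostname_py is_blocked_hostname_py_alt
  simp only [body_eq]
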